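-- pv_equiv track=rewrite | github.com/susanphone/csci127 | Labs/bilabial-count-lab3.py | count_recursive
-- ===== SOURCE A (Python) =====
-- def count_recursive(sentence):      #function that takes an argument
--         totalCount = 0
--         bilabial = ["b", "m", "p"]
--         if len(sentence) > 1:
--             totalCount += count_recursive(sentence[0:len(sentence)-1])
--             totalCount += count_recursive(sentence[(len(sentence) - 1)])
--             return totalCount
--         else:
--             if sentence in bilabial:
--                 return 1
--             else:
--                 return 0
-- ===== SOURCE B (Python) =====
-- def count_recursive(sentence):
--     count = 0
--     bilabial = ["b", "m", "p"]
--     for c in sentence: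
--         if c in bilabial:
--             count += 1
--     return count
-- ===== Notes on version B (the rewrite author's own statement) =====
-- stated objective: simpler
-- what changed: Replaced the doubly-recursive split (drop-last prefix + last character, one call per character plus one per prefix) with a single iterative for-loop over the characters accumulating a counter.
import Mathlib
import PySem

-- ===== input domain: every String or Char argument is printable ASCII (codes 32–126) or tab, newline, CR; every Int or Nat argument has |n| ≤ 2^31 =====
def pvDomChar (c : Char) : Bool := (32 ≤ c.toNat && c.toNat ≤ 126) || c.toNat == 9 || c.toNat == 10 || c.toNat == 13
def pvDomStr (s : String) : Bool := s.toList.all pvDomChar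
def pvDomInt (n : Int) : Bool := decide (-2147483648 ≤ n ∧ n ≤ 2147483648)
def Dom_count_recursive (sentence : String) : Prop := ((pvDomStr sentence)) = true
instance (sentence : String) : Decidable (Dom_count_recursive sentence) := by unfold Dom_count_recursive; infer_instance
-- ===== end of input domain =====

-- B replaces A's double recursion (drop-last prefix + last character) with one iterative pass accumulating a counter.

-- ===== PORT A =====
-- A works on strings; slices and indexing are ported on the character list:
-- sentence[0:len-1] = dropLast, sentence[len-1] = the last character (a 1-char string).
def countRecA : List Char → Int
  | l =>
    if h : l.length > 1 then
      -- totalCount += count_recursive(sentence[0:len(sentence)-1]); += count_recursive(sentence[len-1])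
      countRecA l.dropLast +
      countRecA [l.getLast (by intro hnil; simp [hnil] at h)]
    else
      -- if sentence in ["b","m","p"]
      if l ∈ [['b'], ['m'], ['p']] then 1 else 0
termination_by l => l.length
decreasing_by
  · have hne : l ≠ [] := by intro hnil; simp [hnil] at h
    simpa [List.length_dropLast] using Nat.sub_lt (List.length_pos_iff.mpr hne) one_pos
  · simpa using h

def count_recursive (sentence : String) : Int := countRecA sentence.toList

-- ===== PORT B =====
def count_recursive_alt (sentence : String) : Int :=
  sentence.toList.foldl (fun count c => if c ∈ ['b', 'm', 'p'] then count + 1 else count) 0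

-- ===== PRECONDITION & SPEC =====
def Spec_count_recursive (sentence : String) (out : Int) : Prop := out = count_recursive_alt sentence
instance (sentence : String) (out : Int) : Decidable (Spec_count_recursive sentence out) := by unfold Spec_count_recursive; infer_instance

-- ===== CLAIM (what is proved, stated in full; the proofs are below) =====
def Claim_equal_count_recursive : Prop := ∀ (sentence : String), Dom_count_recursive sentence → Spec_count_recursive sentence (count_recursive sentence)

-- ===== LEMMAS AND PROOFS =====

def pvBilab (c : Char) : Bool := decide (c ∈ ['b', 'm', 'p'])

theorem countRecA_eq_aux : ∀ (n : Nat) (l : List Char), l.length ≤ n →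
    countRecA l = (l.countP pvBilab : Int) := by
  intro n
  induction n with
  | zero =>
    intro l hl
    have : l = [] := List.eq_nil_of_length_eq_zero (Nat.le_zero.mp hl)
    subst this
    rw [countRecA]; simp
  | succ n ih =>
    intro l hl
    by_cases h : l.length > 1
    · rw [countRecA]
      simp only [h, dif_pos]
      have hne : l ≠ [] := by intro hnil; simp [hnil] at h
      rw [ih l.dropLast (by simp [List.length_dropLast]; omega),
          ih [l.getLast hne] (by simp; omega)]
      conv_rhs => rw [← List.dropLast_append_getLast hne]
      simp [List.countP_append]
    · rw [countRecA]
      simp only [h, dif_neg, not_false_iff]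
      match l, h with
      | [], _ => simp
      | [c], _ =>
        by_cases hc : c ∈ ['b', 'm', 'p'] <;>
          simp_all [pvBilab]
      | a :: b :: t, h => simp at h

theorem countRecA_eq_countP (l : List Char) : countRecA l = (l.countP pvBilab : Int) :=
  countRecA_eq_aux l.length l le_rfl

theorem foldl_count (l : List Char) (a : Int) :
    l.foldl (fun count c => if c ∈ ['b', 'm', 'p'] then count + 1 else count) a
      = a + (l.countP pvBilab : Int) := by
  induction l generalizing a with
  | nil => simp
  | cons c t ih =>
    simp only [List.foldl]
    by_cases hc : c ∈ ['b', 'm', 'p']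
    · rw [if_pos hc, ih, List.countP_cons]
      have hb : pvBilab c = true := by simpa [pvBilab] using hc
      rw [hb]
      simp
      ring
    · rw [if_neg hc, ih, List.countP_cons]
      have hb : pvBilab c = false := by simpa [pvBilab] using hc
      rw [hb]
      simp

-- ===== VERDICT (by name: the statement is the Claim_ definition above) =====
theorem count_recursive_spec : Claim_equal_count_recursive := by
  intro s _
  unfold Spec_count_recursive count_recursive count_recursive_alt
  rw [countRecA_eq_countP, foldl_count]
  simp
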